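-- pv_equiv track=rewrite | github.com/Linuxfabrik/lib | human.py | extract_hrnumbers
-- ===== SOURCE A (Python) =====
-- def extract_hrnumbers(s, boundaries=None):
--     """
--     Extracts all numbers from a string that start with a digit and end with a known boundary.
--
--     This function scans the input string and extracts substrings that start with a digit and end
--     with a known boundary character (such as 's', 'm', 'h', etc.), and returns these substrings
--     as a list.
--
--     ### Parameters
--     - **s** (`str`): The input string to extract numbers from.
--     - **boundaries** (`list`, optional): A list of boundary characters that signify the end of
--       a number. Defaults to ['s', 'm', 'h', 'D', 'W', 'M', 'Y'].
--
--     ### Returns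
--     - **list**: A list of strings representing the extracted numbers along with their boundaries.
--
--     ### Example
--     >>> string = '31Y 20M7s  88  abc12xyz   4s 5'
--     >>> extract_hrnumbers(string)
--     ['31Y', '20M', '7s', '4s']
--
--     >>> string = '17G 3M 4B'
--     >>> extract_hrnumbers(string, boundaries=['G', 'M', 'B'])
--     ['17G', '3M', '4B']
--     """
--     if boundaries is None:
--         boundaries = ['s', 'm', 'h', 'D', 'W', 'M', 'Y']
--
--     extracted = []
--     start_idx = None
--
--     for idx, char in enumerate(s):
--         if char.isdigit() and start_idx is None:
--             start_idx = idx
--         elif char in boundaries and start_idx is not None: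
--             extracted.append(s[start_idx:idx + 1])
--             start_idx = None
--         elif not char.isdigit():
--             start_idx = None
--
--     return extracted
-- ===== SOURCE B (Python) =====
-- def extract_hrnumbers(s, boundaries=None):
--     if boundaries is None:
--         boundaries = ['s', 'm', 'h', 'D', 'W', 'M', 'Y']
--     bset = {b for b in boundaries if len(b) == 1}
--     out = []
--     i, n = 0, len(s)
--     while i < n:
--         if not s[i].isdigit():
--             i += 1
--             continue
--         # find the first j > i where the digit run is interrupted or closed
--         j = i + 1
--         while j < n and s[j].isdigit() and s[j] not in bset:
--             j += 1
--         if j < n and s[j] in bset: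
--             out.append(s[i:j + 1])
--         i = j + 1
--     return out
-- ===== Notes on version B (the rewrite author's own statement) =====
-- stated objective: faster
-- what changed: B replaces A's per-character enumerate fold with a start_idx state flag by an index-jumping two-level scan that locates each digit run directly (find run start, advance to its first boundary/interruption, emit, jump past it), testing boundary membership against a set of the single-character boundaries built once instead of scanning the boundary list per character.
import Mathlib
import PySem

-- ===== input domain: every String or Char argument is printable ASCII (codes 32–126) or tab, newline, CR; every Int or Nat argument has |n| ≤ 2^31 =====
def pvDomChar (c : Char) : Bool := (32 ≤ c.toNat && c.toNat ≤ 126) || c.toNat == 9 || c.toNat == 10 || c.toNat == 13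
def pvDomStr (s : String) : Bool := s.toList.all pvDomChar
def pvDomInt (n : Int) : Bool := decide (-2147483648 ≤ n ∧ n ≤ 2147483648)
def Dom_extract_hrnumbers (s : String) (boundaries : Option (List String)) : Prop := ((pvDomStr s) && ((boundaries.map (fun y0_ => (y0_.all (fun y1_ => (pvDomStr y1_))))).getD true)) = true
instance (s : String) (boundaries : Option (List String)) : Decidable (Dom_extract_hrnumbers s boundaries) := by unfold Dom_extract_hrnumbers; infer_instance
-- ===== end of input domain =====

-- B replaces A's per-character state-machine fold by an index-jumping scan that locates each
-- digit run directly (objective: alternative decomposition; same asymptotic cost).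

-- ===== PORT A =====
-- one loop iteration of A: state = (extracted, start_idx)
def stepA (s : String) (bs : List String) (st : List String × Option Int) (p : Int × Char) :
    List String × Option Int :=
  if PySem.Chars.isdigit p.2 && st.2.isNone then (st.1, some p.1)
  else if bs.contains (String.ofList [p.2]) && st.2.isSome then
    (st.1 ++ [PySem.Str.slice s (some (st.2.getD 0)) (some (p.1 + 1))], none)
  else if !(PySem.Chars.isdigit p.2) then (st.1, none)
  else st

def extract_hrnumbers (s : String) (boundaries : Option (List String)) : List String :=
  let bs := boundaries.getD ["s", "m", "h", "D", "W", "M", "Y"]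
  ((PySem.List.enumerate s.toList 0).foldl (stepA s bs) ([], none)).1

-- ===== PORT B =====
-- inner while loop of B: advance j while s[j] is a digit and not a boundary
def altInner (l : List Char) (bset : List String) (j : Nat) : Nat :=
  if h : j < l.length then
    if PySem.Chars.isdigit l[j] && !bset.contains (String.ofList [l[j]]) then
      altInner l bset (j + 1)
    else j
  else j
termination_by l.length - j

-- the port of B's outer while loop needs j ≤ altInner … j for termination
theorem le_altInner (l : List Char) (bset : List String) (j : Nat) :
    j ≤ altInner l bset j := by
  unfold altInner
  split
  · split
    · exact le_trans (Nat.le_succ j) (le_altInner l bset (j + 1))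
    · exact le_refl j
  · exact le_refl j
termination_by l.length - j

-- outer while loop of B
def altOuter (s : String) (l : List Char) (bset : List String) (i : Nat) : List String :=
  if h : i < l.length then
    if !(PySem.Chars.isdigit l[i]) then altOuter s l bset (i + 1)
    else
      let j := altInner l bset (i + 1)
      if hj : j < l.length then
        if bset.contains (String.ofList [l[j]]) then
          PySem.Str.slice s (some (i : Int)) (some ((j : Int) + 1)) :: altOuter s l bset (j + 1)
        else altOuter s l bset (j + 1)
      else altOuter s l bset (j + 1)
  else []
termination_by l.length - i
decreasing_by
  all_goals (first | omega | (have := le_altInner l bset (i + 1); omega))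

def extract_hrnumbers_alt (s : String) (boundaries : Option (List String)) : List String :=
  let bs := boundaries.getD ["s", "m", "h", "D", "W", "M", "Y"]
  let bset : PySem.Set String := PySem.Set.ofList (bs.filter (fun b => PySem.Str.len b == 1))
  altOuter s s.toList bset 0

-- ===== PRECONDITION & SPEC =====
def Spec_extract_hrnumbers (s : String) (boundaries : Option (List String)) (out : List String) : Prop := out = extract_hrnumbers_alt s boundaries
instance (s : String) (boundaries : Option (List String)) (out : List String) : Decidable (Spec_extract_hrnumbers s boundaries out) := by unfold Spec_extract_hrnumbers; infer_instance

-- ===== CLAIM (what is proved, stated in full; the proofs are below) =====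
def Claim_equal_extract_hrnumbers : Prop := ∀ (s : String) (boundaries : Option (List String)), Dom_extract_hrnumbers s boundaries → Spec_extract_hrnumbers s boundaries (extract_hrnumbers s boundaries)

-- ===== LEMMAS AND PROOFS =====

-- B's filtered set answers single-character membership exactly like A's raw boundary list
theorem contains_filter_set (bs : List String) (c : Char) :
    (PySem.Set.ofList (bs.filter (fun b => PySem.Str.len b == 1)) : List String).contains
        (String.ofList [c])
      = bs.contains (String.ofList [c]) := by
  rw [List.contains_eq_mem]
  simp [List.contains_eq_mem, PySem.Set.mem_ofList, List.mem_filter, PySem.Str.len_eq]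

-- unfolding equations for B's inner loop
theorem altInner_ge_len (l : List Char) (bset : List String) (j : Nat) (h : l.length ≤ j) :
    altInner l bset j = j := by
  unfold altInner; rw [dif_neg (by omega)]

theorem altInner_step (l : List Char) (bset : List String) (j : Nat) (h : j < l.length)
    (hc : (PySem.Chars.isdigit l[j] && !bset.contains (String.ofList [l[j]])) = true) :
    altInner l bset j = altInner l bset (j + 1) := by
  conv_lhs => unfold altInner
  rw [dif_pos h, if_pos hc]

theorem altInner_halt (l : List Char) (bset : List String) (j : Nat) (h : j < l.length)
    (hc : (PySem.Chars.isdigit l[j] && !bset.contains (String.ofList [l[j]])) = false) :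
    altInner l bset j = j := by
  unfold altInner; rw [dif_pos h, if_neg (by simp only [hc]; exact Bool.false_ne_true)]

theorem altOuter_nondigit (s : String) (l : List Char) (bset : List String) (i : Nat)
    (h : i < l.length) (hd : PySem.Chars.isdigit l[i] = false) :
    altOuter s l bset i = altOuter s l bset (i + 1) := by
  conv_lhs => rw [altOuter]
  simp [h, hd]

theorem altOuter_emit (s : String) (l : List Char) (bset : List String) (i : Nat)
    (h : i < l.length) (hd : PySem.Chars.isdigit l[i] = true)
    (hk : altInner l bset (i + 1) < l.length)
    (hc : bset.contains (String.ofList [l[altInner l bset (i + 1)]]) = true) :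
    altOuter s l bset i
      = PySem.Str.slice s (some (i : Int)) (some ((altInner l bset (i + 1) : Int) + 1))
          :: altOuter s l bset (altInner l bset (i + 1) + 1) := by
  conv_lhs => rw [altOuter]
  have hm : String.ofList [l[altInner l bset (i + 1)]] ∈ bset := by simpa using hc
  simp [h, hd, hk, hm]

theorem altOuter_skip (s : String) (l : List Char) (bset : List String) (i : Nat)
    (h : i < l.length) (hd : PySem.Chars.isdigit l[i] = true)
    (hk : altInner l bset (i + 1) < l.length)
    (hc : bset.contains (String.ofList [l[altInner l bset (i + 1)]]) = false) :
    altOuter s l bset i = altOuter s l bset (altInner l bset (i + 1) + 1) := by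
  conv_lhs => rw [altOuter]
  have hm : String.ofList [l[altInner l bset (i + 1)]] ∉ bset := by simpa using hc
  simp [h, hd, hk, hm]

theorem altOuter_end (s : String) (l : List Char) (bset : List String) (i : Nat)
    (h : i < l.length) (hd : PySem.Chars.isdigit l[i] = true)
    (hk : ¬ altInner l bset (i + 1) < l.length) :
    altOuter s l bset i = altOuter s l bset (altInner l bset (i + 1) + 1) := by
  conv_lhs => rw [altOuter]
  simp [h, hd, hk]

theorem altOuter_ge_len (s : String) (l : List Char) (bset : List String) (i : Nat)
    (h : l.length ≤ i) : altOuter s l bset i = [] := by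
  unfold altOuter; rw [dif_neg (by omega)]

-- the main simulation: A's fold from any position/state equals B's scan
theorem key (s : String) (bs bset : List String)
    (hb : ∀ c : Char, bset.contains (String.ofList [c]) = bs.contains (String.ofList [c])) :
    ∀ m : Nat,
      (∀ i acc, s.toList.length - i = m →
        ((PySem.List.enumerate (s.toList.drop i) (i : Int)).foldl (stepA s bs) (acc, none)).1
          = acc ++ altOuter s s.toList bset i)
      ∧ (∀ i j acc, s.toList.length - j = m → i < j →
        ((PySem.List.enumerate (s.toList.drop j) (j : Int)).foldl (stepA s bs)
            (acc, some (i : Int))).1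
          = acc ++ ((if h : altInner s.toList bset j < s.toList.length then
                (if bset.contains (String.ofList [s.toList[altInner s.toList bset j]]) then
                  [PySem.Str.slice s (some (i : Int))
                    (some ((altInner s.toList bset j : Int) + 1))]
                else [])
              else [])
              ++ altOuter s s.toList bset (altInner s.toList bset j + 1))) := by
  intro m
  induction m using Nat.strong_induction_on with
  | _ m IH =>
  constructor
  · intro i acc hm
    by_cases hi : i < s.toList.length
    · have hdrop : s.toList.drop i = s.toList[i] :: s.toList.drop (i + 1) :=
        (List.getElem_cons_drop hi).symm
      rw [hdrop, PySem.List.enumerate_cons, List.foldl_cons]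
      by_cases hd : PySem.Chars.isdigit s.toList[i]
      · have hstep : stepA s bs (acc, none) ((i : Int), s.toList[i]) = (acc, some (i : Int)) := by
          simp [stepA, hd]
        rw [hstep, show ((i : Int) + 1) = ((i + 1 : Nat) : Int) by push_cast; ring]
        have hQ := (IH (s.toList.length - (i + 1)) (by omega)).2 i (i + 1) acc rfl (by omega)
        rw [hQ]
        by_cases hk : altInner s.toList bset (i + 1) < s.toList.length
        · by_cases hc2 : bset.contains
              (String.ofList [s.toList[altInner s.toList bset (i + 1)]]) = true
          · rw [dif_pos hk, if_pos hc2, altOuter_emit s s.toList bset i hi hd hk hc2]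
            simp
          · rw [dif_pos hk, if_neg hc2,
              altOuter_skip s s.toList bset i hi hd hk (Bool.eq_false_iff.mpr hc2)]
            simp
        · rw [dif_neg hk, altOuter_end s s.toList bset i hi hd hk]
          simp
      · have hstep : stepA s bs (acc, none) ((i : Int), s.toList[i]) = (acc, none) := by
          simp only [stepA]
          rw [if_neg (by simp [hd]), if_neg (by simp), if_pos (by simp [hd])]
        rw [hstep, show ((i : Int) + 1) = ((i + 1 : Nat) : Int) by push_cast; ring]
        have hP := (IH (s.toList.length - (i + 1)) (by omega)).1 (i + 1) acc rfl
        rw [hP, altOuter_nondigit s s.toList bset i hi (Bool.eq_false_iff.mpr hd)]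
    · rw [List.drop_eq_nil_of_le (by omega), PySem.List.enumerate_nil, List.foldl_nil,
        altOuter_ge_len s _ bset i (by omega), List.append_nil]
  · intro i j acc hm hij
    by_cases hj : j < s.toList.length
    · have hdrop : s.toList.drop j = s.toList[j] :: s.toList.drop (j + 1) :=
        (List.getElem_cons_drop hj).symm
      rw [hdrop, PySem.List.enumerate_cons, List.foldl_cons]
      by_cases hcont : bset.contains (String.ofList [s.toList[j]])
      · -- boundary hit: A emits and resets, B's inner scan halts here
        have hmem : String.ofList [s.toList[j]] ∈ bset := by simpa using hcont
        have hbs : String.ofList [s.toList[j]] ∈ bs := by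
          have := hb s.toList[j]; simp [List.contains_eq_mem] at this; simpa [← this] using hmem
        have hstep : stepA s bs (acc, some (i : Int)) ((j : Int), s.toList[j])
            = (acc ++ [PySem.Str.slice s (some (i : Int)) (some ((j : Int) + 1))], none) := by
          simp only [stepA]
          rw [if_neg (by simp), if_pos (by simp [hbs])]
          simp
        rw [hstep, show ((j : Int) + 1) = ((j + 1 : Nat) : Int) by push_cast; ring]
        have hP := (IH (s.toList.length - (j + 1)) (by omega)).1 (j + 1)
          (acc ++ [PySem.Str.slice s (some (i : Int)) (some ((j + 1 : Nat) : Int))]) rfl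
        rw [hP, altInner_halt s.toList bset j hj (by simp [hmem]), dif_pos hj,
          if_pos hcont]
        simp
      · by_cases hd : PySem.Chars.isdigit s.toList[j]
        · -- digit, not boundary: A keeps its run, B's inner scan advances
          have hstep : stepA s bs (acc, some (i : Int)) ((j : Int), s.toList[j])
              = (acc, some (i : Int)) := by
            simp only [stepA]
            have hnbs : String.ofList [s.toList[j]] ∉ bs := by
              have := hb s.toList[j]; simp [List.contains_eq_mem] at this
              simpa [← this] using hcont
            rw [if_neg (by simp), if_neg (by simp [hnbs]), if_neg (by simp [hd])]
          rw [hstep, show ((j : Int) + 1) = ((j + 1 : Nat) : Int) by push_cast; ring]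
          have hQ := (IH (s.toList.length - (j + 1)) (by omega)).2 i (j + 1) acc rfl (by omega)
          rw [hQ, altInner_step s.toList bset j hj
            (by simp [hd]; simpa using hcont)]
        · -- neither digit nor boundary: A resets, B's inner scan halts with no emission
          have hstep : stepA s bs (acc, some (i : Int)) ((j : Int), s.toList[j])
              = (acc, none) := by
            simp only [stepA]
            have hnbs : String.ofList [s.toList[j]] ∉ bs := by
              have := hb s.toList[j]; simp [List.contains_eq_mem] at this
              simpa [← this] using hcont
            rw [if_neg (by simp [hd]), if_neg (by simp [hnbs]), if_pos (by simp [hd])]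
          rw [hstep, show ((j : Int) + 1) = ((j + 1 : Nat) : Int) by push_cast; ring]
          have hP := (IH (s.toList.length - (j + 1)) (by omega)).1 (j + 1) acc rfl
          rw [hP, altInner_halt s.toList bset j hj (by simp [hd]), dif_pos hj,
            if_neg hcont]
          simp
    · rw [List.drop_eq_nil_of_le (by omega), PySem.List.enumerate_nil, List.foldl_nil,
        altInner_ge_len s.toList bset j (by omega), dif_neg (by omega),
        altOuter_ge_len s _ bset (j + 1) (by omega)]
      simp

-- ===== VERDICT (by name: the statement is the Claim_ definition above) =====
theorem extract_hrnumbers_spec : Claim_equal_extract_hrnumbers := by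
  intro s boundaries _
  unfold Spec_extract_hrnumbers extract_hrnumbers extract_hrnumbers_alt
  have h := (key s (boundaries.getD ["s", "m", "h", "D", "W", "M", "Y"])
      (PySem.Set.ofList ((boundaries.getD ["s", "m", "h", "D", "W", "M", "Y"]).filter
        (fun b => PySem.Str.len b == 1)))
      (contains_filter_set _) (s.toList.length)).1 0 [] (by omega)
  simpa using h
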